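-- pv_equiv track=rewrite | github.com/abhishekanand/leetcode | test.py | maxintegervalue
-- ===== SOURCE A (Python) =====
-- def maxintegervalue(input):
--     """
--      Function Docstring
--     """
--     totalsum = 0
--     totalmult= 1
--     negative=False
--     for c in input: # Reading one character at a time
--         if c == '-':  # cheking
--             negative=True
--         else:
--             totalsum += int(c)
--             totalmult *= int(c)
--
--     if negative is True:
--         totalsum = -1*totalsum
--         totalmult = -1*totalmult
--     return max(totalsum,totalmult)
-- ===== SOURCE B (Python) =====
-- def maxintegervalue(input):
--     """
--      Function Docstring
--     """
--     counts = {}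
--     for c in input:
--         counts[c] = counts.get(c, 0) + 1
--     sign = -1 if counts.get('-', 0) else 1
--     total, prod = 0, 1
--     for c, k in counts.items():
--         if c != '-':
--             d = int(c)
--             total += d * k
--             prod *= d ** k
--     return max(sign * total, sign * prod)
-- ===== Notes on version B (the rewrite author's own statement) =====
-- stated objective: alternative
-- what changed: A's single fused per-character loop (running sum, running product, inline sign flag) is replaced by a frequency-table algorithm: build a character counter once, read the sign off the counter, then reduce over the distinct digits with multiplicity (d*k for the sum, d**k for the product).
import Mathlib
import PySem

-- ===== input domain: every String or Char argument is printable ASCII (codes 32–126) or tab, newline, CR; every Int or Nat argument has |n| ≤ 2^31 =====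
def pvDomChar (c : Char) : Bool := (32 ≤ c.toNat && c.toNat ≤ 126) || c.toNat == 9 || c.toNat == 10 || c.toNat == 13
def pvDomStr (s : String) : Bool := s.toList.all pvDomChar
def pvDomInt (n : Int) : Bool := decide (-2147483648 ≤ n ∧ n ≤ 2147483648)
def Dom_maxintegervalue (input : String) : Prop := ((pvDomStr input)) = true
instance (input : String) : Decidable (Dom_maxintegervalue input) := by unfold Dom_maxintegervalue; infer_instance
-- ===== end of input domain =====

-- B replaces A's fused per-character loop (running sum, running product, sign flag) by a
-- frequency-table algorithm: count the characters once, read the sign off the table, then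
-- reduce over the distinct digits with multiplicity (d*k for the sum, d**k for the product).
-- ===== PORT A =====
-- int(c) for a single character c, as Python computes it (ValueError = none; Pre_ excludes that)
def pvIntOfChar (c : Char) : Option Int := PySem.Int.ofStr? (String.ofList [c])

def maxintegervalue (input : String) : Int :=
  let st := input.toList.foldl
    (fun (st : Int × Int × Bool) c =>
      if c = '-' then (st.1, st.2.1, true)
      else (st.1 + (pvIntOfChar c).getD 0, st.2.1 * (pvIntOfChar c).getD 0, st.2.2))
    (0, 1, false)
  let totalsum := if st.2.2 then -1 * st.1 else st.1
  let totalmult := if st.2.2 then -1 * st.2.1 else st.2.1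
  max totalsum totalmult

-- ===== PORT B =====
def maxintegervalue_alt (input : String) : Int :=
  -- counts[c] = counts.get(c, 0) + 1  is  Dict.modify c 0 (· + 1)
  let counts : PySem.Dict Char Int :=
    input.toList.foldl (fun d c => d.modify c 0 (· + 1)) PySem.Dict.empty
  let sign : Int := if counts.getD '-' 0 ≠ 0 then -1 else 1
  let st := counts.items.foldl
    (fun (st : Int × Int) (p : Char × Int) =>
      if p.1 = '-' then st
      else (st.1 + (pvIntOfChar p.1).getD 0 * p.2,
            st.2 * (pvIntOfChar p.1).getD 0 ^ p.2.toNat))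
    (0, 1)
  max (sign * st.1) (sign * st.2)

-- ===== PRECONDITION & SPEC =====
-- Pre_ excludes exactly the inputs on which Python's int(c) raises ValueError: any
-- character that is neither a minus sign nor a decimal digit.
def Pre_maxintegervalue (input : String) : Prop :=
  (input.toList.all (fun c => c == '-' || c.isDigit)) = true
instance (input : String) : Decidable (Pre_maxintegervalue input) := by
  unfold Pre_maxintegervalue; infer_instance
def pvWitness_maxintegervalue : String := "-105"
def Spec_maxintegervalue (input : String) (out : Int) : Prop := out = maxintegervalue_alt input
instance (input : String) (out : Int) : Decidable (Spec_maxintegervalue input out) := by unfold Spec_maxintegervalue; infer_instance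

-- ===== CLAIM (what is proved, stated in full; the proofs are below) =====
def Claim_equal_maxintegervalue : Prop := ∀ (input : String), Dom_maxintegervalue input → Pre_maxintegervalue input → Spec_maxintegervalue input (maxintegervalue input)

-- ===== LEMMAS AND PROOFS =====
-- A's loop invariant: state = (s + Σ f c, m * Π f c over non-'-' chars, b || contains '-').
theorem pv_fold_inv (l : List Char) (s m : Int) (b : Bool) :
    l.foldl
      (fun (st : Int × Int × Bool) c =>
        if c = '-' then (st.1, st.2.1, true)
        else (st.1 + (pvIntOfChar c).getD 0, st.2.1 * (pvIntOfChar c).getD 0, st.2.2))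
      (s, m, b)
    = (s + ((l.filter (fun c => c ≠ '-')).map (fun c => (pvIntOfChar c).getD 0)).sum,
       m * ((l.filter (fun c => c ≠ '-')).map (fun c => (pvIntOfChar c).getD 0)).prod,
       b || l.contains '-') := by
  induction l generalizing s m b with
  | nil => simp
  | cons c tl ih =>
    simp only [List.foldl]
    by_cases hc : c = '-'
    · subst hc; simp [ih]
    · rw [if_neg hc, ih]
      have hf : List.filter (fun x => decide (x ≠ '-')) (c :: tl)
          = c :: List.filter (fun x => decide (x ≠ '-')) tl := by
        simp [hc]
      simp only [hf, List.map_cons, List.sum_cons, List.prod_cons, List.contains_cons]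
      have hb : ('-' == c) = false := by simp [Ne.symm hc]
      refine Prod.ext (by ring) (Prod.ext (by ring) (by simp [hb]))

-- B's reduction loop over the counter's items, as sum and product of the filtered items.
theorem pvB_fold (ps : List (Char × Int)) (s m : Int) :
    ps.foldl
      (fun (st : Int × Int) (p : Char × Int) =>
        if p.1 = '-' then st
        else (st.1 + (pvIntOfChar p.1).getD 0 * p.2,
              st.2 * (pvIntOfChar p.1).getD 0 ^ p.2.toNat))
      (s, m)
    = (s + ((ps.filter (fun p => p.1 ≠ '-')).map (fun p => (pvIntOfChar p.1).getD 0 * p.2)).sum,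
       m * ((ps.filter (fun p => p.1 ≠ '-')).map (fun p => (pvIntOfChar p.1).getD 0 ^ p.2.toNat)).prod) := by
  induction ps generalizing s m with
  | nil => simp
  | cons p tl ih =>
    simp only [List.foldl]
    by_cases hp : p.1 = '-'
    · rw [if_pos hp, ih]; simp [hp]
    · rw [if_neg hp, ih]
      have hf : List.filter (fun q => decide (q.1 ≠ '-')) (p :: tl)
          = p :: List.filter (fun q => decide (q.1 ≠ '-')) tl := by
        simp [hp]
      simp only [hf, List.map_cons, List.sum_cons, List.prod_cons]
      exact Prod.ext (by ring) (by ring)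

-- first-occurrence dedup commutes with filter
theorem pv_foldl_add_filter (p : Char → Bool) (l : List Char) (acc : List Char) :
    (l.filter p).foldl PySem.Set.add (acc.filter p) = (l.foldl PySem.Set.add acc).filter p := by
  induction l generalizing acc with
  | nil => rfl
  | cons x tl ih =>
    by_cases hx : p x = true
    · have hadd : PySem.Set.add (acc.filter p) x = (PySem.Set.add acc x).filter p := by
        simp only [PySem.Set.add, PySem.Set.contains]
        by_cases hm : x ∈ acc
        · simp [hm, hx]
        · simp [hm, hx, List.filter_append]
      simp only [List.filter_cons, hx, if_pos, List.foldl, hadd, ih]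
    · have hx' : p x = false := by simpa using hx
      have hadd : (PySem.Set.add acc x).filter p = acc.filter p := by
        simp only [PySem.Set.add, PySem.Set.contains]
        by_cases hm : x ∈ acc
        · simp [hm]
        · simp [hm, List.filter_append, hx']
      simp only [List.filter_cons, hx', Bool.false_eq_true, if_false, List.foldl]
      rw [← hadd]
      exact ih (PySem.Set.add acc x)

theorem pv_ofList_filter (p : Char → Bool) (l : List Char) :
    PySem.Set.ofList (l.filter p) = (PySem.Set.ofList l).filter p := by
  have h := pv_foldl_add_filter p l []
  simpa [PySem.Set.ofList_eq_foldl] using h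

-- sum over the distinct elements weighted by multiplicity = plain sum
theorem pv_sum_dedup (m : List Char) (f : Char → Int) :
    ((PySem.Set.ofList m).map (fun k => f k * (m.count k : Int))).sum = (m.map f).sum := by
  have hnd := PySem.Set.nodup_ofList m
  have hfs : (PySem.Set.ofList m).toFinset = m.toFinset := by
    ext x; simp [List.mem_toFinset, PySem.Set.mem_ofList]
  calc ((PySem.Set.ofList m).map (fun k => f k * (m.count k : Int))).sum
      = (PySem.Set.ofList m).toFinset.sum (fun k => f k * (m.count k : Int)) :=
        (List.sum_toFinset _ hnd).symm
    _ = m.toFinset.sum (fun k => f k * (m.count k : Int)) := by rw [hfs]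
    _ = (m.map f).sum := by
        rw [Finset.sum_list_map_count m f]
        exact Finset.sum_congr rfl (fun x _ => by push_cast [nsmul_eq_mul]; ring)

-- product over the distinct elements raised to multiplicity = plain product
theorem pv_prod_dedup (m : List Char) (f : Char → Int) :
    ((PySem.Set.ofList m).map (fun k => f k ^ m.count k)).prod = (m.map f).prod := by
  have hnd := PySem.Set.nodup_ofList m
  have hfs : (PySem.Set.ofList m).toFinset = m.toFinset := by
    ext x; simp [List.mem_toFinset, PySem.Set.mem_ofList]
  calc ((PySem.Set.ofList m).map (fun k => f k ^ m.count k)).prod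
      = (PySem.Set.ofList m).toFinset.prod (fun k => f k ^ m.count k) :=
        (List.prod_toFinset _ hnd).symm
    _ = m.toFinset.prod (fun k => f k ^ m.count k) := by rw [hfs]
    _ = (m.map f).prod := (Finset.prod_list_map_count m f).symm

-- ===== VERDICT (by name: the statement is the Claim_ definition above) =====
theorem maxintegervalue_spec : Claim_equal_maxintegervalue := by
  intro input _ _
  unfold Spec_maxintegervalue maxintegervalue maxintegervalue_alt
  set l := input.toList with hl
  have hcounter : l.foldl (fun d c => d.modify c 0 (· + 1)) PySem.Dict.empty
      = PySem.Dict.counter l := (PySem.Dict.counter_eq_foldl l).symm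
  dsimp only
  rw [pv_fold_inv, hcounter, PySem.Dict.items_counter, pvB_fold]
  -- rewrite B's filtered mapped items into sums/products over Set.ofList of the filtered list
  have hfm : (List.filter (fun p => decide (p.1 ≠ '-'))
        ((PySem.Set.ofList l).map (fun k => (k, (l.count k : Int)))))
      = ((PySem.Set.ofList l).filter (fun k => decide (k ≠ '-'))).map
          (fun k => (k, (l.count k : Int))) := by
    rw [List.filter_map]; rfl
  set l' := l.filter (fun c => decide (c ≠ '-')) with hl'
  have hS : (PySem.Set.ofList l).filter (fun k => decide (k ≠ '-')) = PySem.Set.ofList l' :=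
    (pv_ofList_filter _ l).symm
  have hcnt : ∀ k ∈ PySem.Set.ofList l', l'.count k = l.count k := by
    intro k hk
    have hk' : k ∈ l' := (PySem.Set.mem_ofList l' k).mp hk
    exact List.count_filter (List.mem_filter.mp hk').2
  have hsum : ((((PySem.Set.ofList l).filter (fun k => decide (k ≠ '-'))).map
        (fun k => (k, (l.count k : Int)))).map (fun p => (pvIntOfChar p.1).getD 0 * p.2)).sum
      = (l'.map (fun c => (pvIntOfChar c).getD 0)).sum := by
    rw [hS, List.map_map]
    simp only [Function.comp_def]
    have hmc : (PySem.Set.ofList l').map (fun k => (pvIntOfChar k).getD 0 * (l.count k : Int))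
        = (PySem.Set.ofList l').map (fun k => (pvIntOfChar k).getD 0 * (l'.count k : Int)) :=
      List.map_congr_left (fun k hk => by rw [hcnt k hk])
    rw [hmc]
    exact pv_sum_dedup l' _
  have hprod : ((((PySem.Set.ofList l).filter (fun k => decide (k ≠ '-'))).map
        (fun k => (k, (l.count k : Int)))).map (fun p => (pvIntOfChar p.1).getD 0 ^ p.2.toNat)).prod
      = (l'.map (fun c => (pvIntOfChar c).getD 0)).prod := by
    rw [hS, List.map_map]
    simp only [Function.comp_def]
    have hmc : (PySem.Set.ofList l').map (fun k => (pvIntOfChar k).getD 0 ^ ((l.count k : Int)).toNat)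
        = (PySem.Set.ofList l').map (fun k => (pvIntOfChar k).getD 0 ^ l'.count k) :=
      List.map_congr_left (fun k hk => by rw [← hcnt k hk]; simp)
    rw [hmc]
    exact pv_prod_dedup l' _
  rw [hfm]
  simp only [hsum, hprod]
  have hsign : ((PySem.Dict.counter l).getD '-' 0 ≠ 0) ↔ (l.contains '-' = true) := by
    rw [PySem.Dict.getD_counter]
    constructor
    · intro h
      have : 0 < List.count '-' l := by omega
      simpa using List.count_pos_iff.mp this
    · intro h
      have : '-' ∈ l := by simpa using h
      have := List.count_pos_iff.mpr this
      omega
  by_cases hmem : '-' ∈ l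
  · have hc : l.contains '-' = true := by simpa using hmem
    rw [if_pos (hsign.mpr hc)]
    simp [hmem, max_neg_neg]
  · have hc : ¬ l.contains '-' = true := by simpa using hmem
    rw [if_neg (fun h => hc (hsign.mp h))]
    simp [hmem]
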